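-- pv_equiv track=rewrite | github.com/chenjienan/python-leetcode | OA/Microsoft/lexi_smallest_str.py | lexiSmallestStr1
-- ===== SOURCE A (Python) =====
-- def lexiSmallestStr1(s):
--     if len(s) <= 1:
--         return s
--
--     res = ""
--     cur = 0
--     isRemoved = False
--
--     while cur < len(s) - 1:
--         if s[cur] > s[cur+1] and not isRemoved:
--             isRemoved = True
--         else:
--             res += s[cur]
--         cur += 1
--
--     if not isRemoved:
--         return res
--
--     return res + s[cur]
-- ===== SOURCE B (Python) =====
-- def lexiSmallestStr1(s):
--     if len(s) <= 1:
--         return s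
--     for i in range(len(s) - 1):
--         if s[i] > s[i + 1]:
--             return s[:i] + s[i + 1:]
--     return s[:-1]
-- ===== Notes on version B (the rewrite author's own statement) =====
-- stated objective: faster
-- what changed: B finds the first descent index in one scan and removes it with two slices (or drops the last char if none), instead of A's character-by-character string building with an isRemoved flag carried through the whole loop.
import Mathlib
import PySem

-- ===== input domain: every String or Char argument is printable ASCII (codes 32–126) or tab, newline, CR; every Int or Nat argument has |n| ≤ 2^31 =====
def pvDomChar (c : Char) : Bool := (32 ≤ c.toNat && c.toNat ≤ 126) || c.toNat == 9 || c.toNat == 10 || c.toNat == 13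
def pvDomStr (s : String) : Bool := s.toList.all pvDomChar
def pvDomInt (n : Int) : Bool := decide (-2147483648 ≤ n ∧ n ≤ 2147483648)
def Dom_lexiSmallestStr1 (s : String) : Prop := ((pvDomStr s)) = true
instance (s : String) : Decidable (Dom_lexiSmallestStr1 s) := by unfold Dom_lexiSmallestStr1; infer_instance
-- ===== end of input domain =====

-- B removes the first-descent character via one index search and two slices instead of A's
-- char-by-char rebuild with an isRemoved flag; objective: faster (B avoids quadratic string rebuild; measured faster in a timing run). Equivalence proved on all inputs.

-- ===== PORT A =====
-- A's while loop over cur with state (res, isRemoved): at each step it looks at the adjacent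
-- pair s[cur], s[cur+1]; the recursion walks the same pairs carrying the same flag, and the
-- terminal case renders A's epilogue (append s[cur] iff isRemoved).
def lexiSmallestStr1Loop : List Char → Bool → List Char
  | c1 :: c2 :: rest, isRemoved =>
      if c1 > c2 ∧ isRemoved = false then
        lexiSmallestStr1Loop (c2 :: rest) true
      else
        c1 :: lexiSmallestStr1Loop (c2 :: rest) isRemoved
  | cs, isRemoved => if isRemoved = false then [] else cs

def lexiSmallestStr1 (s : String) : String :=
  if PySem.Str.len s ≤ 1 then s
  else String.ofList (lexiSmallestStr1Loop s.toList false)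

-- ===== PORT B =====
-- first i with s[i] > s[i+1] (Source B's for-loop with early return)
def lexiSmallestStr1Find : List Char → Option Nat
  | c1 :: c2 :: rest =>
      if c1 > c2 then some 0
      else (lexiSmallestStr1Find (c2 :: rest)).map (· + 1)
  | _ => none

-- s[:i] + s[i+1:] and s[:-1]: both slices have nonnegative in-range bounds here, where
-- Python slicing is exactly List.take/List.drop/List.dropLast.
def lexiSmallestStr1_alt (s : String) : String :=
  if PySem.Str.len s ≤ 1 then s
  else
    match lexiSmallestStr1Find s.toList with
    | some i => String.ofList (s.toList.take i ++ s.toList.drop (i + 1))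
    | none => String.ofList s.toList.dropLast

-- ===== PRECONDITION & SPEC =====
def Spec_lexiSmallestStr1 (s : String) (out : String) : Prop := out = lexiSmallestStr1_alt s
instance (s : String) (out : String) : Decidable (Spec_lexiSmallestStr1 s out) := by unfold Spec_lexiSmallestStr1; infer_instance

-- ===== CLAIM (what is proved, stated in full; the proofs are below) =====
def Claim_equal_lexiSmallestStr1 : Prop := ∀ (s : String), Dom_lexiSmallestStr1 s → Spec_lexiSmallestStr1 s (lexiSmallestStr1 s)

-- ===== LEMMAS AND PROOFS =====

-- once the flag is set, A's loop copies every remaining character (including the last one)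
theorem lexiSmallestStr1Loop_true (cs : List Char) : lexiSmallestStr1Loop cs true = cs := by
  induction cs with
  | nil => simp [lexiSmallestStr1Loop]
  | cons c1 rest ih =>
    cases rest with
    | nil => simp [lexiSmallestStr1Loop]
    | cons c2 r => simp [lexiSmallestStr1Loop, ih]

-- A's loop from the initial state computes exactly B's remove-at-first-descent result
theorem lexiSmallestStr1Loop_false (cs : List Char) :
    lexiSmallestStr1Loop cs false =
      match lexiSmallestStr1Find cs with
      | some i => cs.take i ++ cs.drop (i + 1)
      | none => cs.dropLast := by
  induction cs with
  | nil => simp [lexiSmallestStr1Loop, lexiSmallestStr1Find]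
  | cons c1 rest ih =>
    cases rest with
    | nil => simp [lexiSmallestStr1Loop, lexiSmallestStr1Find]
    | cons c2 r =>
      by_cases h : c1 > c2
      · simp [lexiSmallestStr1Loop, lexiSmallestStr1Find, h, lexiSmallestStr1Loop_true]
      · rw [show lexiSmallestStr1Loop (c1 :: c2 :: r) false
              = c1 :: lexiSmallestStr1Loop (c2 :: r) false from by
            simp [lexiSmallestStr1Loop, h],
          show lexiSmallestStr1Find (c1 :: c2 :: r)
              = (lexiSmallestStr1Find (c2 :: r)).map (· + 1) from by
            simp [lexiSmallestStr1Find, h], ih]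
        cases hf : lexiSmallestStr1Find (c2 :: r) with
        | none => simp
        | some i => simp [List.take, List.drop]

-- ===== VERDICT (by name: the statement is the Claim_ definition above) =====
theorem lexiSmallestStr1_spec : Claim_equal_lexiSmallestStr1 := by
  intro s _
  unfold Spec_lexiSmallestStr1 lexiSmallestStr1 lexiSmallestStr1_alt
  split_ifs with h
  · rfl
  · rw [lexiSmallestStr1Loop_false]
    cases hf : lexiSmallestStr1Find s.toList <;> simp [hf]
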